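-- pv_equiv track=rewrite | github.com/annaoliinyk/SoftServe-Internship_python | pig_latin/pig_latin_task.py | starts_with_consonants
-- ===== SOURCE A (Python) =====
-- CONSONANTS = ("b", "c", "d", "f", "g", "h", "j", "k", "l", "m", "n", "p", "q", "r", "s", "t", "v", "w", "x", "z")
--
-- def starts_with_consonants(word: str):
--     result = word
--     for letter in word:
--         if result.startswith("qu"):
--             result = result[2:] + result[:2]
--         elif result.startswith(CONSONANTS) or letter is word[0]:
--             result = result[1:] + result[0]
--     return result + "ay"
-- ===== SOURCE B (Python) =====
-- CONSONANTS = ("b", "c", "d", "f", "g", "h", "j", "k", "l", "m", "n", "p", "q", "r", "s", "t", "v", "w", "x", "z")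
--
-- _CONS = frozenset(CONSONANTS)
--
-- def starts_with_consonants(word: str):
--     # O(n): track the rotation offset into the original word instead of
--     # rebuilding the rotated string on every step; rotate once at the end.
--     n = len(word)
--     if n == 0:
--         return "ay"
--     first = word[0]
--     k = 0
--     for letter in word:
--         i = k % n
--         if n >= 2 and word[i] == "q" and word[(i + 1) % n] == "u":
--             k += 2
--         elif word[i] in _CONS or letter == first:
--             k += 1
--     i = k % n
--     return word[i:] + word[:i] + "ay"
-- ===== Notes on version B (the rewrite author's own statement) =====
-- stated objective: faster
-- what changed: B tracks a rotation offset into the original word and checks the qu/consonant conditions via O(1) modular indexing, performing a single rotation at the end, instead of A's rebuilding of the rotated string by slicing on every iteration.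
import Mathlib
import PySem

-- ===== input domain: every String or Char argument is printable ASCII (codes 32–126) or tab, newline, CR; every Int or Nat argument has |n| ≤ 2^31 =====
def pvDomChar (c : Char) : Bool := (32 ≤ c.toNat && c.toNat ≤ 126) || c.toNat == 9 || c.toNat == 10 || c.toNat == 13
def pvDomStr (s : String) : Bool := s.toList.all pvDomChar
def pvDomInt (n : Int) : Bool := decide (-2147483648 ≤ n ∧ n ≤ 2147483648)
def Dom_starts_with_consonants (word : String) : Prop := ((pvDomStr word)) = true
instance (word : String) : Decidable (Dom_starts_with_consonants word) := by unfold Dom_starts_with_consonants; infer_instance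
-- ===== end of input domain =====

-- B replaces A's per-iteration string slicing (O(n) each, O(n^2) total) by an O(1)
-- rotation-offset update, rotating once at the end: same return value, O(n) total.
-- (Python's `letter is word[0]` is char-identity; on the ASCII domain it equals `==`.)

-- ===== PORT A =====
def pvCons : List Char := ['b','c','d','f','g','h','j','k','l','m','n','p','q','r','s','t','v','w','x','z']

-- one iteration of A's `for letter in word` body (result is nonempty whenever the
-- second branch runs — a rotation of the nonempty word — so `take 1 = [result[0]]` is exact)
def pvAstep (w result : List Char) (letter : Char) : List Char :=
  if ['q','u'].isPrefixOf result then
    result.drop 2 ++ result.take 2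
  else if (result.head?.any fun c => decide (c ∈ pvCons)) = true ∨ letter = w.headD ' ' then
    result.drop 1 ++ result.take 1
  else result

def starts_with_consonants (word : String) : String :=
  let w := word.toList
  String.mk (w.foldl (pvAstep w) w ++ ['a', 'y'])

-- ===== PORT B =====
-- one iteration of B's loop: update the rotation offset k
def pvBstep (w : List Char) (n : Nat) (first : Char) (k : Nat) (letter : Char) : Nat :=
  let i := k % n
  if 2 ≤ n ∧ w.getD i ' ' = 'q' ∧ w.getD ((i + 1) % n) ' ' = 'u' then k + 2
  else if w.getD i ' ' ∈ pvCons ∨ letter = first then k + 1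
  else k

def starts_with_consonants_alt (word : String) : String :=
  let w := word.toList
  let n := w.length
  if n = 0 then "ay"
  else
    let k := w.foldl (pvBstep w n (w.headD ' ')) 0
    let i := k % n
    String.mk (w.drop i ++ w.take i ++ ['a', 'y'])

-- ===== PRECONDITION & SPEC =====
def Spec_starts_with_consonants (word : String) (out : String) : Prop := out = starts_with_consonants_alt word
instance (word : String) (out : String) : Decidable (Spec_starts_with_consonants word out) := by unfold Spec_starts_with_consonants; infer_instance

-- ===== CLAIM (what is proved, stated in full; the proofs are below) =====
def Claim_equal_starts_with_consonants : Prop := ∀ (word : String), Dom_starts_with_consonants word → Spec_starts_with_consonants word (starts_with_consonants word)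

-- ===== LEMMAS AND PROOFS =====

-- rotating the rotation: drop/take m of `w.rotate k` is `w.rotate (k+m)`
theorem pv_rot_step (w : List Char) (k m : Nat) (hm : m ≤ w.length) :
    (w.rotate k).drop m ++ (w.rotate k).take m = w.rotate (k + m) := by
  rw [← List.rotate_eq_drop_append_take (by rw [List.length_rotate]; exact hm),
    List.rotate_rotate]

theorem pv_prefix2 (s : List Char) :
    (['q','u'].isPrefixOf s) = true ↔ s[0]? = some 'q' ∧ s[1]? = some 'u' := by
  match s with
  | [] => decide
  | [a] =>
    constructor
    · intro h
      have := (List.isPrefixOf_iff_prefix.mp h).length_le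
      simp at this
    · rintro ⟨-, h⟩
      simp at h
  | a :: b :: t =>
    rw [List.isPrefixOf_iff_prefix]
    constructor
    · rintro ⟨u, hu⟩
      injection hu with h1 hu2
      injection hu2 with h2 _
      subst h1; subst h2; simp
    · rintro ⟨h1, h2⟩
      simp only [List.getElem?_cons_zero, Option.some_inj] at h1
      simp only [List.getElem?_cons_succ, List.getElem?_cons_zero, Option.some_inj] at h2
      subst h1; subst h2
      exact ⟨t, rfl⟩

theorem pv_step_inv (w : List Char) (hw : w ≠ []) (k : Nat) (letter : Char) :
    pvAstep w (w.rotate k) letter = w.rotate (pvBstep w w.length (w.headD ' ') k letter) := by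
  have hn : 0 < w.length := List.length_pos_iff.mpr hw
  have hmod : k % w.length < w.length := Nat.mod_lt _ hn
  have hrot : w.rotate (k % w.length) = w.rotate k := List.rotate_mod w k
  have hgetD : ∀ i, i < w.length → w[i]? = some (w.getD i ' ') := by
    intro i hi
    rw [List.getD_eq_getElem?_getD, List.getElem?_eq_getElem hi]
    rfl
  have h0 : (w.rotate k)[0]? = some (w.getD (k % w.length) ' ') := by
    rw [← hrot, List.getElem?_rotate hn, Nat.zero_add, Nat.mod_eq_of_lt hmod]
    exact hgetD _ hmod
  have h1 : 2 ≤ w.length → (w.rotate k)[1]? = some (w.getD ((k % w.length + 1) % w.length) ' ') := by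
    intro h2
    rw [← hrot, List.getElem?_rotate h2, Nat.add_comm]
    exact hgetD _ (Nat.mod_lt _ hn)
  unfold pvAstep pvBstep
  by_cases hqu : 2 ≤ w.length ∧ w.getD (k % w.length) ' ' = 'q' ∧ w.getD ((k % w.length + 1) % w.length) ' ' = 'u'
  · rw [if_pos hqu, if_pos ((pv_prefix2 _).mpr
      ⟨by rw [h0, hqu.2.1], by rw [h1 hqu.1, hqu.2.2]⟩)]
    exact pv_rot_step w k 2 hqu.1
  · rw [if_neg hqu]
    have hquA : ¬ (['q','u'].isPrefixOf (w.rotate k)) = true := by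
      intro h
      obtain ⟨ha, hb⟩ := (pv_prefix2 _).mp h
      have h2 : 2 ≤ w.length := by
        by_contra hlt
        rw [List.getElem?_eq_none (by rw [List.length_rotate]; omega)] at hb
        simp at hb
      exact hqu ⟨h2, by rw [h0] at ha; exact Option.some_inj.mp ha,
        by rw [h1 h2] at hb; exact Option.some_inj.mp hb⟩
    rw [if_neg hquA]
    have hhead : ((w.rotate k).head?.any fun c => decide (c ∈ pvCons))
        = decide (w.getD (k % w.length) ' ' ∈ pvCons) := by
      rw [List.head?_eq_getElem?, h0]; rfl
    by_cases hc : w.getD (k % w.length) ' ' ∈ pvCons ∨ letter = w.headD ' '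
    · have hcA : ((w.rotate k).head?.any fun c => decide (c ∈ pvCons)) = true ∨ letter = w.headD ' ' := by
        rcases hc with hc | hc
        · exact Or.inl (by rw [hhead]; exact decide_eq_true hc)
        · exact Or.inr hc
      rw [if_pos hcA, if_pos hc]
      exact pv_rot_step w k 1 hn
    · have hcA : ¬ (((w.rotate k).head?.any fun c => decide (c ∈ pvCons)) = true ∨ letter = w.headD ' ') := by
        intro h
        rcases h with h | h
        · rw [hhead] at h; exact hc (Or.inl (of_decide_eq_true h))
        · exact hc (Or.inr h)
      rw [if_neg hcA, if_neg hc]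

theorem pv_fold_inv (w : List Char) (hw : w ≠ []) (l : List Char) (k : Nat) :
    l.foldl (pvAstep w) (w.rotate k) = w.rotate (l.foldl (pvBstep w w.length (w.headD ' ')) k) := by
  induction l generalizing k with
  | nil => rfl
  | cons a l ih =>
    simp only [List.foldl_cons, pv_step_inv w hw]
    exact ih _

-- ===== VERDICT (by name: the statement is the Claim_ definition above) =====
theorem starts_with_consonants_spec : Claim_equal_starts_with_consonants := by
  intro word _
  unfold Spec_starts_with_consonants starts_with_consonants starts_with_consonants_alt
  by_cases hw : word.toList = []
  · simp [hw]
    rfl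
  · have hn : ¬ word.toList.length = 0 := by simpa using hw
    simp only [if_neg hn]
    have hfold := pv_fold_inv word.toList hw word.toList 0
    rw [List.rotate_zero] at hfold
    rw [hfold, List.rotate_eq_drop_append_take_mod, List.append_assoc]
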